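-- pv_equiv track=rewrite | github.com/antonio-raian/EXA869-2019.1 | LEXICO/AutomatoIdentificador.py | automato_identificador
-- ===== SOURCE A (Python) =====
-- import string
--
-- LETRAS = list(string.ascii_letters)
--
-- NUMEROS = ['0', '1', '2', '3', '4', '5', '6', '7', '8', '9', '_']
--
-- def automato_identificador(palavra):
--     i = 0
--     for carac in palavra:
--         if(i==0):
--             if(carac in LETRAS):
--                 i+=1
--             elif(carac in NUMEROS):
--                 return ('1', "ERR_IDE "+ palavra)
--             else:
--                 return ('0','')
--         elif carac in LETRAS or carac in NUMEROS:
--             i+=1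
--         else:
--             return ('1',"ERR_IDE " + palavra)
--
--     cont=0
--     if palavra=="principal":
--         cont=1
--     elif palavra=="inteiro":
--         cont=1
--     elif palavra=="constantes":
--         cont=1
--     elif palavra=="variaveis":
--         cont=1
--     elif palavra=="metodo":
--         cont=1
--     elif palavra=="resultado":
--         cont=1
--     elif palavra=="programa":
--         cont=1
--     elif palavra=="entao":
--         cont=1
--     elif palavra=="se":
--         cont=1
--     elif palavra=="senao":
--         cont=1
--     elif palavra=="enquanto":
--         cont=1
--     elif palavra=="leia":
--         cont=1
--     elif palavra=="escreva":
--         cont=1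
--     elif palavra=="vazio":
--         cont=1
--     elif palavra=="real":
--         cont=1
--     elif palavra=="boleano":
--         cont=1
--     elif palavra=="texto":
--         cont=1
--     elif palavra=="verdadeiro":
--         cont=1
--     elif palavra=="falso":
--         cont=1
--     elif palavra=="sistema":
--         cont=1
--
--     if (cont == 1):
--         return('2',"PRE " + palavra)
--     else:
--         return('2',"IDE " + palavra)
-- ===== SOURCE B (Python) =====
-- import string
--
-- KEYWORDS = frozenset({
--     "principal", "inteiro", "constantes", "variaveis", "metodo",
--     "resultado", "programa", "entao", "se", "senao", "enquanto",
--     "leia", "escreva", "vazio", "real", "boleano", "texto",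
--     "verdadeiro", "falso", "sistema"})
--
-- # explicit table-driven DFA over character classes 0=letter, 1=digit/underscore, 2=other
-- # states: 0 start, 1 identifier, 2 bad-first-char(digit/_), 3 bad-later-char, 4 reject(symbol first)
-- _TRANS = [[1, 2, 4],   # from 0
--           [1, 1, 3],   # from 1
--           [2, 2, 2],   # from 2 (absorbing)
--           [3, 3, 3],   # from 3 (absorbing)
--           [4, 4, 4]]   # from 4 (absorbing)
--
--
-- def _cls(c):
--     if c in string.ascii_letters:
--         return 0
--     if '0' <= c <= '9' or c == '_':
--         return 1
--     return 2
--
--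
-- def automato_identificador(palavra):
--     st = 0
--     for c in palavra:
--         st = _TRANS[st][_cls(c)]
--     if st in (0, 1):
--         tag = "PRE " if palavra in KEYWORDS else "IDE "
--         return ('2', tag + palavra)
--     if st in (2, 3):
--         return ('1', "ERR_IDE " + palavra)
--     return ('0', '')
-- ===== Notes on version B (the rewrite author's own statement) =====
-- stated objective: alternative
-- what changed: Replaced A's early-returning scan with positional counter plus a 20-branch keyword if-ladder by an explicit table-driven DFA (a 5x3 transition table over character classes, folded over the whole string with absorbing error states) whose final state selects the verdict, with keyword classification by membership in a frozenset.
import Mathlib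
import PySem

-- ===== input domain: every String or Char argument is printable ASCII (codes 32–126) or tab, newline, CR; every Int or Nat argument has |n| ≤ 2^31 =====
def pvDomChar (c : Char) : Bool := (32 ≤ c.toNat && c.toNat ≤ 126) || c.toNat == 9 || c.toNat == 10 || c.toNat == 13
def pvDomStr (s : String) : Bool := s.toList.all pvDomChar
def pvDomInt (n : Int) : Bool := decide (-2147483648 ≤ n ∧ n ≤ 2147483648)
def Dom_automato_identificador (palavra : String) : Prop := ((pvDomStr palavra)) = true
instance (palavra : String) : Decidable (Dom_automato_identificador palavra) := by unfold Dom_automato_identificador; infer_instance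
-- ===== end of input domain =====

-- B replaces A's early-return scan + 20-branch keyword ladder by a table-driven DFA
-- (5x3 transition table, absorbing error states) plus keyword-set membership; alternative, same cost.


-- ===== PORT A =====
-- literal transliteration of A: state-machine loop with counter i and early returns, then the keyword if-ladder
def pvIsLETRA (c : Char) : Bool := c.isAlpha          -- c in LETRAS (ASCII letters)
def pvIsNUM (c : Char) : Bool := c.isDigit || c == '_'  -- c in NUMEROS

def pvLoopA (palavra : String) : List Char → Nat → Option (String × String)
  | [], _ => none
  | c :: rest, i =>
    if i = 0 then
      if pvIsLETRA c then pvLoopA palavra rest (i + 1)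
      else if pvIsNUM c then some ("1", "ERR_IDE " ++ palavra)
      else some ("0", "")
    else if pvIsLETRA c || pvIsNUM c then pvLoopA palavra rest (i + 1)
    else some ("1", "ERR_IDE " ++ palavra)

def pvLadderA (palavra : String) : Nat :=
  if palavra = "principal" then 1
  else if palavra = "inteiro" then 1
  else if palavra = "constantes" then 1
  else if palavra = "variaveis" then 1
  else if palavra = "metodo" then 1
  else if palavra = "resultado" then 1
  else if palavra = "programa" then 1
  else if palavra = "entao" then 1
  else if palavra = "se" then 1
  else if palavra = "senao" then 1
  else if palavra = "enquanto" then 1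
  else if palavra = "leia" then 1
  else if palavra = "escreva" then 1
  else if palavra = "vazio" then 1
  else if palavra = "real" then 1
  else if palavra = "boleano" then 1
  else if palavra = "texto" then 1
  else if palavra = "verdadeiro" then 1
  else if palavra = "falso" then 1
  else if palavra = "sistema" then 1
  else 0

def automato_identificador (palavra : String) : String × String :=
  match pvLoopA palavra palavra.toList 0 with
  | some r => r
  | none =>
    if pvLadderA palavra = 1 then ("2", "PRE " ++ palavra)
    else ("2", "IDE " ++ palavra)

-- ===== PORT B =====
-- B: table-driven DFA over character classes; final state picks the verdict, keywords by set membership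
def pvKeywords : List String :=
  ["principal", "inteiro", "constantes", "variaveis", "metodo",
   "resultado", "programa", "entao", "se", "senao", "enquanto",
   "leia", "escreva", "vazio", "real", "boleano", "texto",
   "verdadeiro", "falso", "sistema"]

-- the literal 5x3 transition table _TRANS of Source B
def pvTrans : List (List Nat) :=
  [[1, 2, 4], [1, 1, 3], [2, 2, 2], [3, 3, 3], [4, 4, 4]]

-- _cls: 0 = letter, 1 = digit/underscore, 2 = other
def pvCls (c : Char) : Nat :=
  if c.isAlpha then 0 else if c.isDigit || c = '_' then 1 else 2

-- st = _TRANS[st][_cls(c)]; indices are always in range, so plain getD indexing is exact here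
def pvStep (st : Nat) (c : Char) : Nat :=
  (pvTrans.getD st []).getD (pvCls c) 0

def automato_identificador_alt (palavra : String) : String × String :=
  let st := palavra.toList.foldl pvStep 0
  if st = 0 || st = 1 then
    if palavra ∈ pvKeywords then ("2", "PRE " ++ palavra) else ("2", "IDE " ++ palavra)
  else if st = 2 || st = 3 then ("1", "ERR_IDE " ++ palavra)
  else ("0", "")

-- ===== PRECONDITION & SPEC =====
def Spec_automato_identificador (palavra : String) (out : String × String) : Prop := out = automato_identificador_alt palavra
instance (palavra : String) (out : String × String) : Decidable (Spec_automato_identificador palavra out) := by unfold Spec_automato_identificador; infer_instance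

-- ===== CLAIM (what is proved, stated in full; the proofs are below) =====
def Claim_equal_automato_identificador : Prop := ∀ (palavra : String), Dom_automato_identificador palavra → Spec_automato_identificador palavra (automato_identificador palavra)

-- ===== LEMMAS AND PROOFS =====
def pvGoodB (c : Char) : Bool := c.isAlpha || c.isDigit || c = '_'

lemma pvStep_absorb (st : Nat) (hst : st = 2 ∨ st = 3 ∨ st = 4) (c : Char) :
    pvStep st c = st := by
  rcases hst with h | h | h <;> subst h <;>
    simp [pvStep, pvTrans, pvCls] <;> split_ifs <;> rfl

lemma pvFold_absorb (st : Nat) (hst : st = 2 ∨ st = 3 ∨ st = 4) (l : List Char) :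
    l.foldl pvStep st = st := by
  induction l with
  | nil => rfl
  | cons c cs ih => simp [List.foldl, pvStep_absorb st hst c, ih]

lemma pvStep_one (c : Char) :
    pvStep 1 c = if pvGoodB c then 1 else 3 := by
  simp [pvStep, pvTrans, pvCls, pvGoodB]; split_ifs <;> simp_all

lemma pvFold_one (l : List Char) :
    l.foldl pvStep 1 = if l.all pvGoodB then 1 else 3 := by
  induction l with
  | nil => rfl
  | cons c cs ih =>
    by_cases h : pvGoodB c = true
    · simp [List.foldl, pvStep_one, h, ih]
    · simp only [Bool.not_eq_true] at h
      simp [List.foldl, pvStep_one, h, pvFold_absorb 3 (by tauto)]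

lemma pvLoopA_tail (palavra : String) (rest : List Char) (i : Nat) :
    pvLoopA palavra rest (i + 1) =
      if rest.all pvGoodB then none else some ("1", "ERR_IDE " ++ palavra) := by
  induction rest generalizing i with
  | nil => simp [pvLoopA]
  | cons c cs ih =>
    simp only [pvLoopA, Nat.succ_ne_zero, List.all_cons]
    by_cases h : (pvIsLETRA c || pvIsNUM c) = true
    · have hg : pvGoodB c = true := by
        simp [pvGoodB, pvIsLETRA, pvIsNUM] at h ⊢; tauto
      simp [h, hg, ih]
    · have hg : pvGoodB c = false := by
        simp [pvGoodB, pvIsLETRA, pvIsNUM] at h ⊢; tauto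
      simp [h, hg]

set_option maxHeartbeats 2000000 in
lemma pvLadder_iff (p : String) : pvLadderA p = 1 ↔ p ∈ pvKeywords := by
  unfold pvLadderA
  by_cases h1 : p = "principal"
  · rw [if_pos h1]; subst h1; decide
  rw [if_neg h1]
  by_cases h2 : p = "inteiro"
  · rw [if_pos h2]; subst h2; decide
  rw [if_neg h2]
  by_cases h3 : p = "constantes"
  · rw [if_pos h3]; subst h3; decide
  rw [if_neg h3]
  by_cases h4 : p = "variaveis"
  · rw [if_pos h4]; subst h4; decide
  rw [if_neg h4]
  by_cases h5 : p = "metodo"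
  · rw [if_pos h5]; subst h5; decide
  rw [if_neg h5]
  by_cases h6 : p = "resultado"
  · rw [if_pos h6]; subst h6; decide
  rw [if_neg h6]
  by_cases h7 : p = "programa"
  · rw [if_pos h7]; subst h7; decide
  rw [if_neg h7]
  by_cases h8 : p = "entao"
  · rw [if_pos h8]; subst h8; decide
  rw [if_neg h8]
  by_cases h9 : p = "se"
  · rw [if_pos h9]; subst h9; decide
  rw [if_neg h9]
  by_cases h10 : p = "senao"
  · rw [if_pos h10]; subst h10; decide
  rw [if_neg h10]
  by_cases h11 : p = "enquanto"
  · rw [if_pos h11]; subst h11; decide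
  rw [if_neg h11]
  by_cases h12 : p = "leia"
  · rw [if_pos h12]; subst h12; decide
  rw [if_neg h12]
  by_cases h13 : p = "escreva"
  · rw [if_pos h13]; subst h13; decide
  rw [if_neg h13]
  by_cases h14 : p = "vazio"
  · rw [if_pos h14]; subst h14; decide
  rw [if_neg h14]
  by_cases h15 : p = "real"
  · rw [if_pos h15]; subst h15; decide
  rw [if_neg h15]
  by_cases h16 : p = "boleano"
  · rw [if_pos h16]; subst h16; decide
  rw [if_neg h16]
  by_cases h17 : p = "texto"
  · rw [if_pos h17]; subst h17; decide
  rw [if_neg h17]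
  by_cases h18 : p = "verdadeiro"
  · rw [if_pos h18]; subst h18; decide
  rw [if_neg h18]
  by_cases h19 : p = "falso"
  · rw [if_pos h19]; subst h19; decide
  rw [if_neg h19]
  by_cases h20 : p = "sistema"
  · rw [if_pos h20]; subst h20; decide
  rw [if_neg h20]
  simp only [pvKeywords, List.mem_cons, List.not_mem_nil, or_false]
  have hz : (0 : Nat) ≠ 1 := by decide
  tauto

lemma pvKeywordBranch (palavra : String) :
    (if pvLadderA palavra = 1 then (("2", "PRE " ++ palavra) : String × String)
     else ("2", "IDE " ++ palavra)) =
    (if palavra ∈ pvKeywords then ("2", "PRE " ++ palavra) else ("2", "IDE " ++ palavra)) := by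
  rcases pvLadder_iff palavra with ⟨h1, h2⟩
  by_cases hm : palavra ∈ pvKeywords
  · simp [hm, h2 hm]
  · have : pvLadderA palavra ≠ 1 := fun he => hm (h1 he)
    simp [hm, this]

-- ===== VERDICT (by name: the statement is the Claim_ definition above) =====
theorem automato_identificador_spec : Claim_equal_automato_identificador := by
  intro palavra _
  unfold Spec_automato_identificador automato_identificador automato_identificador_alt
  rcases h : palavra.toList with _ | ⟨c, rest⟩
  · simp only [pvLoopA, List.foldl]
    simpa using pvKeywordBranch palavra
  · simp only [pvLoopA, List.foldl]
    by_cases ha : pvIsLETRA c = true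
    · have ha' : c.isAlpha = true := ha
      have hs : pvStep 0 c = 1 := by simp [pvStep, pvTrans, pvCls, ha']
      rw [if_pos ha, pvLoopA_tail]
      simp only [hs, pvFold_one]
      by_cases hall : rest.all pvGoodB = true
      · simpa [hall] using pvKeywordBranch palavra
      · simp only [Bool.not_eq_true] at hall
        simp [hall]
    · have ha' : c.isAlpha = false := by simpa [pvIsLETRA] using ha
      rw [if_neg ha]
      by_cases hn : pvIsNUM c = true
      · have hd : (c.isDigit || c = '_') = true := by simpa [pvIsNUM] using hn
        have hcls : pvCls c = 1 := by simp [pvCls, ha', hd]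
        have hs : pvStep 0 c = 2 := by simp [pvStep, pvTrans, hcls]
        simp only [hs, pvFold_absorb 2 (by tauto) rest]
        simp [hn]
      · have hd : ¬ c.isDigit ∧ ¬ c = '_' := by
          simpa [pvIsNUM] using hn
        have hcls : pvCls c = 2 := by simp [pvCls, ha', hd.1, hd.2]
        have hs : pvStep 0 c = 4 := by simp [pvStep, pvTrans, hcls]
        simp only [hs, pvFold_absorb 4 (by tauto) rest]
        simp [hn]
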